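-- pv_equiv track=rewrite | github.com/weijia/ufs-tools | ufs_tools/string_tools.py | split_with_chars
-- ===== SOURCE A (Python) =====
-- def split_with_chars(s, separator_list):
--     """
--     Separate string with multiple chars, such as ",\r\n\t" etc
--     """
--     r = [s]
--     for i in separator_list:
--         t = []
--         for j in r:
--             t.extend(j.split(i))
--         r = t
--     return r
-- ===== SOURCE B (Python) =====
-- def split_with_chars(s, separator_list):
--     """
--     Separate string with multiple chars, such as ",\r\n\t" etc
--     """
--     k = len(separator_list)
--     out = []
--     stack = [(s, 0)]
--     while stack:
--         part, i = stack.pop()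
--         if i < k:
--             for piece in reversed(part.split(separator_list[i])):
--                 stack.append((piece, i + 1))
--         else:
--             out.append(part)
--     return out
-- ===== Notes on version B (the rewrite author's own statement) =====
-- stated objective: alternative
-- what changed: B replaces A's iterative level-by-level rebuild of the whole fragment list once per separator with a depth-first recursion on the separator list that splits each fragment completely before moving to the next.
import Mathlib
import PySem

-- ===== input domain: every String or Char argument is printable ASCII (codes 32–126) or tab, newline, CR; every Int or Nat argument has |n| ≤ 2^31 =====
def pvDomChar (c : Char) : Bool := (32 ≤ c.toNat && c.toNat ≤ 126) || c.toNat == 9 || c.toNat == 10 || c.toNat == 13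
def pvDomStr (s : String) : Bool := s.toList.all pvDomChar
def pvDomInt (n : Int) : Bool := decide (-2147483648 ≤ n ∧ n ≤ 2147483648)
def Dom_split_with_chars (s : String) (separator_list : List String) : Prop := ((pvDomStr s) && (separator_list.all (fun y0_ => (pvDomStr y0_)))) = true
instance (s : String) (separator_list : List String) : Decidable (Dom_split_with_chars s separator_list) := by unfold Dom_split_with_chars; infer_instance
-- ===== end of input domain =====

-- B replaces A's per-separator rebuild of the whole fragment list with an explicit-stack
-- depth-first traversal that takes each fragment through all remaining separators before
-- moving to the next fragment (alternative decomposition, same asymptotic cost).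


-- ===== PORT A =====
-- j.split(i): Python raises ValueError when i = "" (PySem.Str.split? = none there);
-- Pre_ excludes that input, so the .getD [] default is never reached on admitted inputs.
def pySplitD (j i : String) : List String := (PySem.Str.split? j i).getD []

def split_with_chars (s : String) (separator_list : List String) : List String :=
  separator_list.foldl
    (fun r i => r.foldl (fun t j => t ++ pySplitD j i) [])
    [s]

-- ===== PORT B =====
-- Termination facts for B's stack loop (cited by name in decreasing_by below):
-- a split of `part` yields at most |part| + 2 pieces whose lengths sum to at most |part|.
lemma pySplitD_go_len : ∀ (fuel : Nat) (l cur : List Char) (acc : List (List Char)) (sep : List Char),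
    (PySem.Chars.splitOn.go sep fuel l cur acc).length ≤ acc.length + fuel + 1 := by
  intro fuel
  induction fuel with
  | zero => intro l cur acc sep; rw [PySem.Chars.splitOn.go]; simp
  | succ n ih =>
      intro l cur acc sep
      match l with
      | [] =>
          rw [PySem.Chars.splitOn.go]
          · simp
          · omega
      | c :: rest =>
          rw [PySem.Chars.splitOn.go]
          split
          · exact le_trans (ih _ _ _ _) (by simp; omega)
          · exact le_trans (ih _ _ _ _) (by omega)

lemma pySplitD_go_sum : ∀ (fuel : Nat) (l cur : List Char) (acc : List (List Char)) (sep : List Char),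
    ((PySem.Chars.splitOn.go sep fuel l cur acc).map List.length).sum
      ≤ ((acc.map List.length).sum + cur.length) + l.length := by
  intro fuel
  induction fuel with
  | zero => intro l cur acc sep; rw [PySem.Chars.splitOn.go]; simp; omega
  | succ n ih =>
      intro l cur acc sep
      match l with
      | [] =>
          rw [PySem.Chars.splitOn.go]
          · simp
          · omega
      | c :: rest =>
          rw [PySem.Chars.splitOn.go]
          split
          · refine le_trans (ih _ _ _ _) ?_
            simp
            have := List.length_drop (l := c :: rest) (i := sep.length)
            omega
          · refine le_trans (ih _ _ _ _) ?_
            simp; omega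

lemma pySplitD_len (part sep : String) :
    (pySplitD part sep).length ≤ part.toList.length + 2 := by
  unfold pySplitD
  unfold PySem.Str.split? PySem.Chars.split?
  split
  · simp
  · simpa [PySem.Chars.splitOn] using
      pySplitD_go_len (part.toList.length + 1) part.toList [] [] sep.toList

lemma pySplitD_sum (part sep : String) :
    ((pySplitD part sep).map (fun p => p.toList.length)).sum ≤ part.toList.length := by
  unfold pySplitD
  unfold PySem.Str.split? PySem.Chars.split?
  split
  · simp
  · have h := pySplitD_go_sum (part.toList.length + 1) part.toList [] [] sep.toList
    simp only [PySem.Chars.splitOn] at *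
    simpa [Function.comp_def, List.map_map] using h

-- the combined strict decrease used by both recursive calls of the stack loop
lemma pySplitD_measure_lt (part sep : String) (k i : Nat) (h : i < k) :
    ((pySplitD part sep).map
        (fun p => (p.toList.length + 1) * 3 ^ (k - (i + 1)))).sum
      < (part.toList.length + 1) * 3 ^ (k - i) := by
  have hsum : ∀ (l : List String), (l.map (fun p => p.toList.length + 1)).sum
      = (l.map (fun p => p.toList.length)).sum + l.length := by
    intro l
    induction l with
    | nil => rfl
    | cons x xs ih => simp only [List.map_cons, List.sum_cons, ih, List.length_cons]; omega
  have h1 : ((pySplitD part sep).map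
        (fun p => (p.toList.length + 1) * 3 ^ (k - (i + 1)))).sum
      = (((pySplitD part sep).map (fun p => p.toList.length + 1)).sum) * 3 ^ (k - (i + 1)) := by
    rw [← List.sum_map_mul_right]
  have hk : k - i = (k - (i + 1)) + 1 := by omega
  have hlen := pySplitD_len part sep
  have hs := pySplitD_sum part sep
  rw [h1, hsum, hk, pow_succ]
  -- (binder-level rewriting done; now pure arithmetic)
  calc (((pySplitD part sep).map (fun p => p.toList.length)).sum + (pySplitD part sep).length)
          * 3 ^ (k - (i + 1))
      ≤ (part.toList.length + (part.toList.length + 2)) * 3 ^ (k - (i + 1)) :=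
        Nat.mul_le_mul_right _ (by omega)
    _ < ((part.toList.length + 1) * 3) * 3 ^ (k - (i + 1)) :=
        Nat.mul_lt_mul_of_lt_of_le (by omega) (le_refl _) (Nat.pow_pos (by omega))
    _ = (part.toList.length + 1) * (3 ^ (k - (i + 1)) * 3) := by ring

-- B's while loop: pop (part, i); if i < len(seps) push the pieces of part.split(seps[i])
-- (reversed append in Python = leftmost piece on top = prepend here), else emit part.
def dfsAlt (seps : List String) (stack : List (String × Nat)) (out : List String) : List String :=
  match stack with
  | [] => out
  | (part, i) :: rest =>
    if h : i < seps.length then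
      dfsAlt seps ((pySplitD part (seps[i])).map (fun p => (p, i + 1)) ++ rest) out
    else
      dfsAlt seps rest (out ++ [part])
termination_by (stack.map (fun e => (e.1.toList.length + 1) * 3 ^ (seps.length - e.2))).sum
decreasing_by
  · simp only [List.map_append, List.sum_append, List.map_map, List.map_cons, List.sum_cons]
    have key := pySplitD_measure_lt part (seps[i]) seps.length i h
    have : ((pySplitD part seps[i]).map
        ((fun e => (e.1.toList.length + 1) * 3 ^ (seps.length - e.2)) ∘ fun p => (p, i + 1))).sum
        = ((pySplitD part seps[i]).map
            (fun p => (p.toList.length + 1) * 3 ^ (seps.length - (i + 1)))).sum := rfl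
    omega
  · simp only [List.map_cons, List.sum_cons]
    have : 0 < (part.toList.length + 1) * 3 ^ (seps.length - i) :=
      Nat.mul_pos (by omega) (Nat.pow_pos (by omega))
    omega

def split_with_chars_alt (s : String) (separator_list : List String) : List String :=
  dfsAlt separator_list [(s, 0)] []

-- ===== PRECONDITION & SPEC =====
-- Pre_ excludes exactly the inputs on which Python A raises ValueError: an empty separator string.
def Pre_split_with_chars (s : String) (separator_list : List String) : Prop :=
  ∀ t ∈ separator_list, t ≠ ""
instance (s : String) (separator_list : List String) : Decidable (Pre_split_with_chars s separator_list) := by unfold Pre_split_with_chars; infer_instance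

def pvWitness_split_with_chars : String × List String := ("a,b c\td", [",", " ", "\t"])

def Spec_split_with_chars (s : String) (separator_list : List String) (out : List String) : Prop := out = split_with_chars_alt s separator_list
instance (s : String) (separator_list : List String) (out : List String) : Decidable (Spec_split_with_chars s separator_list out) := by unfold Spec_split_with_chars; infer_instance

-- ===== CLAIM (what is proved, stated in full; the proofs are below) =====
def Claim_equal_split_with_chars : Prop := ∀ (s : String) (separator_list : List String), Dom_split_with_chars s separator_list → Pre_split_with_chars s separator_list → Spec_split_with_chars s separator_list (split_with_chars s separator_list)

-- ===== LEMMAS AND PROOFS =====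

-- proof-side description of "split one fragment through a list of separators"
def fragSplit (s : String) (seps : List String) : List String :=
  match seps with
  | [] => [s]
  | sep :: rest => (pySplitD s sep).flatMap (fun p => fragSplit p rest)

-- A's loop, resumed from an arbitrary fragment list r, splits every fragment through seps.
lemma foldl_split_eq_flatMap_frag (seps : List String) (r : List String) :
    seps.foldl (fun r i => r.foldl (fun t j => t ++ pySplitD j i) []) r
      = r.flatMap (fun x => fragSplit x seps) := by
  induction seps generalizing r with
  | nil => simp [fragSplit]
  | cons sep rest ih =>
      rw [List.foldl_cons, ih, show (r.foldl (fun t j => t ++ pySplitD j sep) [])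
            = r.flatMap (fun j => pySplitD j sep) from by
          simpa using PySem.List.foldl_append_eq_flatMap (fun j => pySplitD j sep) r [],
        List.flatMap_assoc]
      rfl

-- B's stack loop emits, after `out`, each stacked fragment split through its remaining separators.
lemma dfsAlt_spec (seps : List String) (stack : List (String × Nat)) (out : List String) :
    dfsAlt seps stack out
      = out ++ stack.flatMap (fun e => fragSplit e.1 (seps.drop e.2)) := by
  fun_induction dfsAlt seps stack out with
  | case1 out => simp
  | case2 out part i rest h ih =>
      rw [ih]
      have hdrop : seps.drop i = seps[i] :: seps.drop (i + 1) :=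
        List.drop_eq_getElem_cons h
      have hfrag : fragSplit part (seps.drop i)
          = (pySplitD part seps[i]).flatMap (fun p => fragSplit p (seps.drop (i + 1))) := by
        rw [hdrop]; rfl
      simp only [List.flatMap_cons, List.flatMap_append, List.flatMap_map, hfrag]
  | case3 out part i rest h ih =>
      rw [ih]
      have hdrop : seps.drop i = [] := List.drop_eq_nil_of_le (by omega)
      simp [hdrop, fragSplit]

-- ===== VERDICT (by name: the statement is the Claim_ definition above) =====
theorem split_with_chars_spec : Claim_equal_split_with_chars := by
  intro s seps _ _
  unfold Spec_split_with_chars split_with_chars split_with_chars_alt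
  rw [foldl_split_eq_flatMap_frag, dfsAlt_spec]
  simp
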